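-- pv_equiv track=rewrite | github.com/Nghia03092004/nghia03092004.github.io | project_euler/problem_841/solution.py | count_star_polygons
-- ===== SOURCE A (Python) =====
-- from math import gcd, sin, pi
--
-- def count_star_polygons(N: int):
--     """Count total number of valid star polygons."""
--     count = 0
--     for n in range(3, N + 1):
--         for k in range(2, n // 2 + 1):
--             if n % 2 == 0 and k == n // 2:
--                 continue
--             if gcd(n, k) == 1:
--                 count += 1
--     return count
-- ===== SOURCE B (Python) =====
-- def _phi(n):
--     """Euler's totient of n >= 1 by trial division."""
--     result = n
--     m = n
--     p = 2
--     while p * p <= m: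
--         if m % p == 0:
--             result -= result // p
--             while m % p == 0:
--                 m //= p
--         p += 1
--     if m > 1:
--         result -= result // m
--     return result
--
--
-- def count_star_polygons(N: int):
--     """Count total number of valid star polygons."""
--     total = 0
--     for n in range(3, N + 1):
--         total += _phi(n) // 2 - 1
--     return total
-- ===== Notes on version B (the rewrite author's own statement) =====
-- stated objective: faster
-- what changed: Replaces the per-n inner gcd loop over all k in [2, n//2] by the closed form phi(n)//2 - 1, with phi computed by trial-division factorization.
import Mathlib
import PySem

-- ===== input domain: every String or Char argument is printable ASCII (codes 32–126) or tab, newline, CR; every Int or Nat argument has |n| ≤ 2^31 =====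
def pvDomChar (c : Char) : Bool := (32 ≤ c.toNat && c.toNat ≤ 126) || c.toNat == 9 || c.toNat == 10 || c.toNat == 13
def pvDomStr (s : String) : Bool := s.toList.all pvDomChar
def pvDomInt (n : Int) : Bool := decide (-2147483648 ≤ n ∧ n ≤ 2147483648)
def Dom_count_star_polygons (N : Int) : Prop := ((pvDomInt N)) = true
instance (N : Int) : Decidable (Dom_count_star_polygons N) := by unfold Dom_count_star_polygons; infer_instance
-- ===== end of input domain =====

-- B replaces A's inner gcd loop over k in [2, n//2] by phi(n)//2 - 1 with phi computed by
-- trial-division factorization (measurably faster asymptotically: the inner scan disappears).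


-- ===== PORT A =====
-- count = 0; for n in range(3, N+1): for k in range(2, n//2+1): skip (n even and k == n//2); if gcd==1: count += 1
def count_star_polygons (N : Int) : Int :=
  (PySem.List.pyRange 3 (N + 1) 1).foldl
    (fun count n =>
      (PySem.List.pyRange 2 (PySem.Int.floordiv n 2 + 1) 1).foldl
        (fun count k =>
          if PySem.Int.mod n 2 = 0 ∧ k = PySem.Int.floordiv n 2 then count
          else if Int.gcd n k = 1 then count + 1 else count)
        count)
    0

-- ===== PORT B =====
-- Python's inner 'while m % p == 0: m //= p' (the fuel argument only bounds the trip count;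
-- fuel = m always suffices since m shrinks at every iteration)
def stripFac : Nat → Nat → Nat → Nat
  | 0, m, _ => m
  | fuel + 1, m, p => if 2 ≤ p ∧ p ∣ m ∧ m ≠ 0 then stripFac fuel (m / p) p else m

-- _phi's main loop: while p*p <= m: if m % p == 0: result -= result//p; strip p from m; p += 1;
-- then: if m > 1: result -= result // m.  All values are nonnegative ints, so Nat arithmetic is
-- exact; fuel only bounds the trip count (fuel = m+1 suffices: m + 1 - p shrinks every iteration)
def phiLoop : Nat → Nat → Nat → Nat → Nat
  | 0, result, _, _ => result
  | fuel + 1, result, m, p =>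
    if p * p ≤ m then
      if m % p = 0 then phiLoop fuel (result - result / p) (stripFac m m p) (p + 1)
      else phiLoop fuel result m (p + 1)
    else if 1 < m then result - result / m
    else result

-- _phi(n): result = m = n; p = 2; loop
def phiNat (n : Nat) : Nat := phiLoop (n + 1) n n 2

-- total = 0; for n in range(3, N+1): total += _phi(n)//2 - 1
-- (n is at least 3 in the loop, so n.toNat is exactly Python's n)
def count_star_polygons_alt (N : Int) : Int :=
  (PySem.List.pyRange 3 (N + 1) 1).foldl
    (fun total n => total + (PySem.Int.floordiv ((phiNat n.toNat : Nat) : Int) 2 - 1)) 0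

-- ===== PRECONDITION & SPEC =====
def Spec_count_star_polygons (N : Int) (out : Int) : Prop := out = count_star_polygons_alt N
instance (N : Int) (out : Int) : Decidable (Spec_count_star_polygons N out) := by unfold Spec_count_star_polygons; infer_instance

-- ===== CLAIM (what is proved, stated in full; the proofs are below) =====
def Claim_equal_count_star_polygons : Prop := ∀ (N : Int), Dom_count_star_polygons N → Spec_count_star_polygons N (count_star_polygons N)

-- ===== LEMMAS AND PROOFS =====

-- stripFac really removes the full p-power from m (given enough fuel)
theorem stripFac_spec (p : Nat) (hp : p.Prime) :
    ∀ fuel m, m ≠ 0 → m ≤ fuel → ∃ a, m = p ^ a * stripFac fuel m p ∧ ¬ p ∣ stripFac fuel m p := by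
  intro fuel
  induction fuel with
  | zero => intro m h0 h1; omega
  | succ fuel ih =>
    intro m hm0 hmf
    have hunf : stripFac (fuel + 1) m p
        = if 2 ≤ p ∧ p ∣ m ∧ m ≠ 0 then stripFac fuel (m / p) p else m := rfl
    by_cases hd : p ∣ m
    · have hcond : 2 ≤ p ∧ p ∣ m ∧ m ≠ 0 := ⟨hp.two_le, hd, hm0⟩
      rw [hunf, if_pos hcond]
      have h2 : 2 ≤ p := hp.two_le
      have hlt : m / p < m := Nat.div_lt_self (by omega) (by omega)
      have hne : m / p ≠ 0 := by
        rcases hd with ⟨c, rfl⟩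
        have hc : c ≠ 0 := by rintro rfl; simp at hm0
        rw [Nat.mul_div_cancel_left _ (by omega)]
        exact hc
      obtain ⟨a, ha, hnd⟩ := ih (m / p) hne (by omega)
      refine ⟨a + 1, ?_, hnd⟩
      calc m = p * (m / p) := (Nat.mul_div_cancel' hd).symm
        _ = p * (p ^ a * stripFac fuel (m / p) p) := by rw [← ha]
        _ = p ^ (a + 1) * stripFac fuel (m / p) p := by ring
    · have hcond : ¬ (2 ≤ p ∧ p ∣ m ∧ m ≠ 0) := by tauto
      rw [hunf, if_neg hcond]
      exact ⟨0, by simp, hd⟩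

-- terminal branches of phiLoop (p*p > m): m is 1 or prime
theorem phiLoop_terminal (fuel m p c : Nat) (hm : 1 ≤ m) (hp : 2 ≤ p) (hppm : ¬ p * p ≤ m)
    (hmp : ∀ q, q.Prime → q ∣ m → p ≤ q) (hcp : ∀ q, q.Prime → q ∣ c → q < p) :
    phiLoop (fuel + 1) (m * Nat.totient c) m p = Nat.totient (m * c) := by
  have hunf : phiLoop (fuel + 1) (m * Nat.totient c) m p
      = if p * p ≤ m then
          (if m % p = 0 then
            phiLoop fuel (m * Nat.totient c - m * Nat.totient c / p) (stripFac m m p) (p + 1)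
          else phiLoop fuel (m * Nat.totient c) m (p + 1))
        else if 1 < m then m * Nat.totient c - m * Nat.totient c / m
        else m * Nat.totient c := rfl
  rw [hunf, if_neg hppm]
  by_cases h1 : 1 < m
  · rw [if_pos h1]
    have hprime : m.Prime := by
      by_contra hnp
      have h1' := Nat.minFac_sq_le_self (by omega : 0 < m) hnp
      have h2' := hmp _ (Nat.minFac_prime (by omega : m ≠ 1)) (Nat.minFac_dvd m)
      have h3' : p * p ≤ m.minFac * m.minFac := Nat.mul_le_mul h2' h2'
      have h4' : m.minFac * m.minFac ≤ m := by nlinarith [h1']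
      omega
    have hdiv : m * Nat.totient c / m = Nat.totient c := Nat.mul_div_cancel_left _ (by omega)
    rw [hdiv]
    have hco : Nat.Coprime m c := by
      rw [Nat.Prime.coprime_iff_not_dvd hprime]
      intro hdc
      have hlt := hcp m hprime hdc
      have hge := hmp m hprime dvd_rfl
      omega
    rw [Nat.totient_mul hco, Nat.totient_prime hprime, Nat.sub_mul, one_mul]
  · rw [if_neg h1]
    have hm1 : m = 1 := by omega
    subst hm1
    simp

theorem phi_sub_arith (q p s T : Nat) :
    T * (q * p * s) - q * s * T = s * (q * (p - 1) * T) := by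
  have key : q * s * T * (p - 1) = q * s * T * p - q * s * T * 1 := Nat.mul_sub _ _ _
  rw [mul_one] at key
  have e1 : T * (q * p * s) = q * s * T * p := by ring
  have e2 : s * (q * (p - 1) * T) = q * s * T * (p - 1) := by
    generalize p - 1 = P; ring
  rw [e1, e2, key]

theorem phiLoop_eq : ∀ fuel m p c, m + 1 - p ≤ fuel → 1 ≤ m → 2 ≤ p →
    (∀ q, q.Prime → q ∣ m → p ≤ q) → (∀ q, q.Prime → q ∣ c → q < p) →
    phiLoop fuel (m * Nat.totient c) m p = Nat.totient (m * c) := by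
  intro fuel
  induction fuel with
  | zero =>
    intro m p c hn hm hp hmp hcp
    have hm1 : m = 1 := by
      by_contra hm1
      have h1 := Nat.minFac_prime (n := m) (by omega)
      have h2 := hmp _ h1 (Nat.minFac_dvd m)
      have h3 := Nat.minFac_le (by omega : 0 < m)
      omega
    subst hm1
    simp [phiLoop]
  | succ fuel ih =>
    intro m p c hn hm hp hmp hcp
    by_cases hppm : p * p ≤ m
    · have hpm : p ≤ m := le_trans (Nat.le_mul_of_pos_left p (by omega)) hppm
      have hunf : phiLoop (fuel + 1) (m * Nat.totient c) m p
          = if p * p ≤ m then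
              (if m % p = 0 then
                phiLoop fuel (m * Nat.totient c - m * Nat.totient c / p) (stripFac m m p) (p + 1)
              else phiLoop fuel (m * Nat.totient c) m (p + 1))
            else if 1 < m then m * Nat.totient c - m * Nat.totient c / m
            else m * Nat.totient c := rfl
      rw [hunf, if_pos hppm]
      by_cases hmod : m % p = 0
      · rw [if_pos hmod]
        have hdvd : p ∣ m := Nat.dvd_of_mod_eq_zero hmod
        have hpprime : p.Prime := by
          have h1 := Nat.minFac_prime (n := p) (by omega)
          have hdp : p.minFac ∣ m := dvd_trans (Nat.minFac_dvd p) hdvd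
          have h2 := hmp _ h1 hdp
          have h3 := Nat.minFac_le (by omega : 0 < p)
          have h4 : p.minFac = p := le_antisymm h3 h2
          rwa [h4] at h1
        have hm0 : m ≠ 0 := by omega
        obtain ⟨a, hma, hnd⟩ := stripFac_spec p hpprime m m hm0 (le_refl m)
        set s := stripFac m m p with hs
        have ha1 : 1 ≤ a := by
          rcases Nat.eq_zero_or_pos a with rfl | h
          · rw [pow_zero, one_mul] at hma
            exact absurd (hma ▸ hdvd) hnd
          · exact h
        have hm'pos : 1 ≤ s := by
          rcases Nat.eq_zero_or_pos s with h | h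
          · rw [h, mul_zero] at hma; omega
          · exact h
        have hm'lt : s < m := by
          have h2a : 2 ≤ p ^ a := le_trans (by omega) (Nat.le_self_pow (by omega) p)
          calc s < 2 * s := by omega
            _ ≤ p ^ a * s := Nat.mul_le_mul_right _ h2a
            _ = m := hma.symm
        have hcop : Nat.Coprime (p ^ a) c :=
          Nat.Coprime.pow_left _ (hpprime.coprime_iff_not_dvd.mpr
            (fun hdc => absurd (hcp p hpprime hdc) (lt_irrefl p)))
        have hpa : p ^ a = p ^ (a - 1) * p := by
          rw [← pow_succ]; congr 1; omega
        have hdivm : m / p = p ^ (a - 1) * s := by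
          rw [hma, hpa, mul_comm (p ^ (a - 1)) p, mul_assoc,
            Nat.mul_div_cancel_left _ (by omega : 0 < p)]
        have hres : m * Nat.totient c - m * Nat.totient c / p
            = s * Nat.totient (p ^ a * c) := by
          rw [Nat.totient_mul hcop, Nat.totient_prime_pow hpprime (by omega : 0 < a)]
          rw [mul_comm m (Nat.totient c), Nat.mul_div_assoc _ hdvd,
            mul_comm (Nat.totient c) (m / p)]
          rw [hdivm, hma, hpa]
          exact phi_sub_arith (p ^ (a - 1)) p s (Nat.totient c)
        rw [hres]
        have hrec := ih s (p + 1) (p ^ a * c) (by omega) hm'pos (by omega)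
          (fun q hq hqd => by
            have hqm : q ∣ m := by rw [hma]; exact Dvd.dvd.mul_left hqd _
            have h5 := hmp q hq hqm
            have h6 : q ≠ p := fun h => hnd (h ▸ hqd)
            omega)
          (fun q hq hqd => by
            rcases (Nat.Prime.dvd_mul hq).mp hqd with h | h
            · have : q = p := (Nat.prime_dvd_prime_iff_eq hq hpprime).mp (hq.dvd_of_dvd_pow h)
              omega
            · have := hcp q hq h; omega)
        rw [hrec]
        congr 1
        rw [hma]; ring
      · rw [if_neg hmod]
        exact ih m (p + 1) c (by omega) hm (by omega)
          (fun q hq hqd => by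
            have h5 := hmp q hq hqd
            have h6 : q ≠ p := by
              rintro rfl
              exact hmod (Nat.mod_eq_zero_of_dvd hqd)
            omega)
          (fun q hq hqd => by have := hcp q hq hqd; omega)
    · exact phiLoop_terminal fuel m p c hm hp hppm hmp hcp

theorem phiNat_eq (m : Nat) : phiNat m = Nat.totient m := by
  rcases Nat.eq_zero_or_pos m with rfl | hm
  · simp [phiNat, phiLoop]
  · have h := phiLoop_eq (m + 1) m 2 1 (by omega) hm (le_refl 2)
      (fun q hq _ => hq.two_le)
      (fun q hq hqd => absurd (Nat.dvd_one.mp hqd) hq.ne_one)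
    simpa [phiNat] using h

theorem countP_range_eq_card (n : Nat) (p : Nat → Prop) [DecidablePred p] :
    (List.range n).countP (fun j => decide (p j)) = ((Finset.range n).filter p).card := by
  induction n with
  | zero => simp
  | succ n ih =>
    rw [List.range_succ, List.countP_append, Finset.range_add_one, Finset.filter_insert]
    have hcnt : List.countP (fun j => decide (p j)) [n] = if p n then 1 else 0 := by
      by_cases h : p n <;> simp [h]
    by_cases h : p n
    · rw [if_pos h, Finset.card_insert_of_notMem (by simp), hcnt, if_pos h, ih]
    · rw [if_neg h, hcnt, if_neg h, ih, Nat.add_zero]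

-- counting side: the coprime k in [1, m/2] are exactly half of the totient
theorem totient_halves (m : Nat) (hm : 3 ≤ m) :
    Nat.totient m = 2 * ((Finset.Ico 1 (m / 2 + 1)).filter (fun k => Nat.gcd m k = 1)).card := by
  have h0 : Nat.totient m = ((Finset.Ico 1 m).filter (fun k => Nat.gcd m k = 1)).card := by
    rw [Nat.totient_eq_card_coprime]
    have e1 : (Finset.range m).filter (Nat.Coprime m)
        = (Finset.range m).filter (fun k => Nat.gcd m k = 1) := by
      apply Finset.filter_congr
      intro x _
      simp [Nat.Coprime]
    have e2 : (Finset.range m).filter (fun k => Nat.gcd m k = 1)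
        = (Finset.Ico 1 m).filter (fun k => Nat.gcd m k = 1) := by
      rw [Finset.range_eq_Ico]
      rw [show Finset.Ico 0 m = insert 0 (Finset.Ico 1 m) from by
        rw [← Finset.insert_Ico_add_one_left_eq_Ico (by omega : (0:ℕ) < m)]; norm_num]
      rw [Finset.filter_insert, if_neg (by simp; omega)]
    rw [e1, e2]
  have hsplit : Finset.Ico 1 m = Finset.Ico 1 (m / 2 + 1) ∪ Finset.Ico (m / 2 + 1) m :=
    (Finset.Ico_union_Ico_eq_Ico (by omega) (by omega)).symm
  have hdisj : Disjoint
      ((Finset.Ico 1 (m / 2 + 1)).filter (fun k => Nat.gcd m k = 1))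
      ((Finset.Ico (m / 2 + 1) m).filter (fun k => Nat.gcd m k = 1)) :=
    Finset.disjoint_filter_filter (Finset.Ico_disjoint_Ico_consecutive 1 (m / 2 + 1) m)
  rw [h0, hsplit, Finset.filter_union, Finset.card_union_of_disjoint hdisj]
  have hbij : ((Finset.Ico (m / 2 + 1) m).filter (fun k => Nat.gcd m k = 1)).card
      = ((Finset.Ico 1 (m / 2 + 1)).filter (fun k => Nat.gcd m k = 1)).card := by
    refine Finset.card_bij' (fun k _ => m - k) (fun k _ => m - k) ?hi ?hj ?hleft ?hright
    case hi =>
      intro k hk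
      simp only [Finset.mem_filter, Finset.mem_Ico] at hk ⊢
      obtain ⟨⟨hk1, hk2⟩, hkg⟩ := hk
      refine ⟨⟨by omega, by omega⟩, ?_⟩
      exact (Nat.coprime_self_sub_right (by omega : k ≤ m)).mpr hkg
    case hj =>
      intro k hk
      simp only [Finset.mem_filter, Finset.mem_Ico] at hk ⊢
      obtain ⟨⟨hk1, hk2⟩, hkg⟩ := hk
      have hkne : ¬ (m % 2 = 0 ∧ k = m / 2) := by
        rintro ⟨he, rfl⟩
        have hdvd : m / 2 ∣ m := ⟨2, by omega⟩
        have hg2 : Nat.gcd m (m / 2) = m / 2 := Nat.gcd_eq_right hdvd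
        rw [hg2] at hkg
        omega
      refine ⟨⟨by omega, by omega⟩, ?_⟩
      exact (Nat.coprime_self_sub_right (by omega : k ≤ m)).mpr hkg
    case hleft =>
      intro k hk
      simp only [Finset.mem_filter, Finset.mem_Ico] at hk
      show m - (m - k) = k
      omega
    case hright =>
      intro k hk
      simp only [Finset.mem_filter, Finset.mem_Ico] at hk
      show m - (m - k) = k
      omega
  omega

theorem inner_count (m : Nat) (hm : 3 ≤ m) :
    (List.range (m / 2 - 1)).countP (fun j => decide (Nat.gcd m (2 + j) = 1))
      = Nat.totient m / 2 - 1 ∧ 1 ≤ Nat.totient m / 2 := by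
  have hH := totient_halves m hm
  have h1mem : (1 : ℕ) ∈ (Finset.Ico 1 (m / 2 + 1)).filter (fun k => Nat.gcd m k = 1) := by
    rw [Finset.mem_filter, Finset.mem_Ico]
    refine ⟨⟨le_refl 1, by omega⟩, Nat.gcd_one_right m⟩
  have hHpos : 1 ≤ ((Finset.Ico 1 (m / 2 + 1)).filter (fun k => Nat.gcd m k = 1)).card :=
    Finset.card_pos.mpr ⟨1, h1mem⟩
  have hins : (Finset.Ico 1 (m / 2 + 1)).filter (fun k => Nat.gcd m k = 1)
      = insert 1 ((Finset.Ico 2 (m / 2 + 1)).filter (fun k => Nat.gcd m k = 1)) := by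
    have h12 : Finset.Ico 1 (m / 2 + 1) = insert 1 (Finset.Ico 2 (m / 2 + 1)) := by
      rw [← Finset.insert_Ico_add_one_left_eq_Ico (by omega : 1 < m / 2 + 1)]; norm_num
    rw [h12, Finset.filter_insert, if_pos (Nat.gcd_one_right m)]
  have hcard : ((Finset.Ico 1 (m / 2 + 1)).filter (fun k => Nat.gcd m k = 1)).card
      = ((Finset.Ico 2 (m / 2 + 1)).filter (fun k => Nat.gcd m k = 1)).card + 1 := by
    rw [hins, Finset.card_insert_of_notMem (by simp)]
  have hshift : (List.range (m / 2 - 1)).countP (fun j => decide (Nat.gcd m (2 + j) = 1))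
      = ((Finset.Ico 2 (m / 2 + 1)).filter (fun k => Nat.gcd m k = 1)).card := by
    rw [countP_range_eq_card (p := fun j => Nat.gcd m (2 + j) = 1)]
    refine Finset.card_bij' (fun j _ => 2 + j) (fun k _ => k - 2) ?hi ?hj ?hleft ?hright
    case hi =>
      intro j hj
      simp only [Finset.mem_filter, Finset.mem_range] at hj
      simp only [Finset.mem_filter, Finset.mem_Ico]
      exact ⟨⟨by omega, by omega⟩, hj.2⟩
    case hj =>
      intro k hk
      simp only [Finset.mem_filter, Finset.mem_Ico] at hk
      simp only [Finset.mem_filter, Finset.mem_range]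
      obtain ⟨⟨hk1, hk2⟩, hkg⟩ := hk
      rw [show 2 + (k - 2) = k from by omega]
      exact ⟨by omega, hkg⟩
    case hleft =>
      intro j hj
      show 2 + j - 2 = j
      omega
    case hright =>
      intro k hk
      simp only [Finset.mem_filter, Finset.mem_Ico] at hk
      show 2 + (k - 2) = k
      omega
  constructor
  · rw [hshift]; omega
  · omega

-- per-iteration equality of the two outer-loop bodies
theorem step_eq (m : Nat) (hm3 : 3 ≤ m) (acc : Int) :
    (PySem.List.pyRange 2 (PySem.Int.floordiv (m : Int) 2 + 1) 1).foldl
      (fun count k =>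
        if PySem.Int.mod (m : Int) 2 = 0 ∧ k = PySem.Int.floordiv (m : Int) 2 then count
        else if Int.gcd (m : Int) k = 1 then count + 1 else count) acc
    = acc + (PySem.Int.floordiv ((phiNat m : Nat) : Int) 2 - 1) := by
  have hfd : PySem.Int.floordiv (m : Int) 2 = ((m / 2 : Nat) : Int) := by
    exact_mod_cast PySem.Int.floordiv_natCast m 2
  have hmod : PySem.Int.mod (m : Int) 2 = ((m % 2 : Nat) : Int) := by
    exact_mod_cast PySem.Int.mod_natCast m 2
  have hstep : (PySem.List.pyRange 2 (PySem.Int.floordiv (m : Int) 2 + 1) 1).foldl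
      (fun count k =>
        if PySem.Int.mod (m : Int) 2 = 0 ∧ k = PySem.Int.floordiv (m : Int) 2 then count
        else if Int.gcd (m : Int) k = 1 then count + 1 else count) acc
      = (PySem.List.pyRange 2 (PySem.Int.floordiv (m : Int) 2 + 1) 1).foldl
      (fun count k => if Int.gcd (m : Int) k = 1 then count + 1 else count) acc := by
    apply PySem.List.foldl_congr_mem
    intro count k hk
    rw [PySem.List.mem_pyRange_one] at hk
    by_cases hc : PySem.Int.mod (m : Int) 2 = 0 ∧ k = PySem.Int.floordiv (m : Int) 2
    · rw [if_pos hc]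
      obtain ⟨heven, hkeq⟩ := hc
      rw [hmod] at heven
      have heven' : m % 2 = 0 := by exact_mod_cast heven
      rw [hfd] at hkeq
      subst hkeq
      rw [if_neg]
      have hdvd : m / 2 ∣ m := ⟨2, by omega⟩
      have hg : Int.gcd (m : Int) ((m / 2 : Nat) : Int) = Nat.gcd m (m / 2) :=
        Int.gcd_natCast_natCast m (m / 2)
      rw [hg, Nat.gcd_eq_right hdvd]
      omega
    · rw [if_neg hc]
  rw [hstep, PySem.List.foldl_ite_add_one]
  have hR : ((PySem.Int.floordiv (m : Int) 2 + 1 - 2)).toNat = m / 2 - 1 := by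
    rw [hfd]; omega
  rw [PySem.List.pyRange_one, List.countP_map, hR]
  have hpred : (List.range (m / 2 - 1)).countP
      ((fun k => decide (Int.gcd (m : Int) k = 1)) ∘ (fun k : Nat => (2 : Int) + (k : Int)))
      = (List.range (m / 2 - 1)).countP (fun j => decide (Nat.gcd m (2 + j) = 1)) := by
    apply List.countP_congr
    intro j _
    simp only [Function.comp_apply]
    have h1 : (2 : Int) + (j : Int) = ((2 + j : Nat) : Int) := by push_cast; ring
    rw [h1, Int.gcd_natCast_natCast]
  rw [hpred]
  obtain ⟨hcnt, hpos⟩ := inner_count m hm3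
  rw [hcnt, phiNat_eq]
  have hfd2 : PySem.Int.floordiv ((Nat.totient m : Nat) : Int) 2 = ((Nat.totient m / 2 : Nat) : Int) := by
    exact_mod_cast PySem.Int.floordiv_natCast (Nat.totient m) 2
  rw [hfd2]
  have : ((Nat.totient m / 2 - 1 : Nat) : Int) = ((Nat.totient m / 2 : Nat) : Int) - 1 := by omega
  rw [this]

-- ===== VERDICT (by name: the statement is the Claim_ definition above) =====
theorem count_star_polygons_spec : Claim_equal_count_star_polygons := by
  intro N _
  unfold Spec_count_star_polygons count_star_polygons count_star_polygons_alt
  apply PySem.List.foldl_congr_mem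
  intro acc n hn
  rw [PySem.List.mem_pyRange_one] at hn
  obtain ⟨hn3, _⟩ := hn
  obtain ⟨m, rfl⟩ : ∃ m : ℕ, n = (m : Int) := ⟨n.toNat, (Int.toNat_of_nonneg (by omega)).symm⟩
  have hm3 : 3 ≤ m := by exact_mod_cast hn3
  have htn : ((m : Int)).toNat = m := Int.toNat_natCast m
  rw [htn]
  exact step_eq m hm3 acc
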